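-- pv_equiv track=rewrite | github.com/mateizidarutue/Language-AI | obfs/obfuscation_high_weight.py | _all_word_positions
-- ===== SOURCE A (Python) =====
-- from typing import List, Optional, Tuple, Dict, Iterable
--
-- def _all_word_positions(tokens: List[str]) -> Dict[str, List[int]]:
--     """
--     Map token -> list of 1-based occurrence indices (for nth occurrence replacement).
--     """
--     pos: Dict[str, List[int]] = {}
--     counts: Dict[str, int] = {}
--     for t in tokens:
--         key = t.lower()
--         counts[key] = counts.get(key, 0) + 1
--         pos.setdefault(key, []).append(counts[key])
--     return pos
-- ===== SOURCE B (Python) =====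
-- def _all_word_positions(tokens):
--     """
--     Map token -> list of 1-based occurrence indices (for nth occurrence replacement).
--     """
--     counts = {}
--     for t in tokens:
--         k = t.lower()
--         counts[k] = counts.get(k, 0) + 1
--     return {k: list(range(1, c + 1)) for k, c in counts.items()}
-- ===== Notes on version B (the rewrite author's own statement) =====
-- stated objective: simpler
-- what changed: B keeps only a frequency table during the single traversal and regenerates each index list afterwards as list(range(1, c+1)), instead of maintaining and appending to one list per key inside the loop.
import Mathlib
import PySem

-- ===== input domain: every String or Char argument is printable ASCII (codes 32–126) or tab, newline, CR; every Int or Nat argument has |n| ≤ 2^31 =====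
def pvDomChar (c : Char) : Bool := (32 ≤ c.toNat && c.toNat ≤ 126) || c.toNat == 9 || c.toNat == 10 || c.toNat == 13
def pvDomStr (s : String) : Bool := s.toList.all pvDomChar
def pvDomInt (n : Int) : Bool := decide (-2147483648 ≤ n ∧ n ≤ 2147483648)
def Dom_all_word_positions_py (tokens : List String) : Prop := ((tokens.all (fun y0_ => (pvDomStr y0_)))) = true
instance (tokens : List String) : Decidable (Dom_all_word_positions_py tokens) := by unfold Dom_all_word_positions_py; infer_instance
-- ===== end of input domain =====

-- B is simpler: it keeps only a per-key counter during the traversal and regenerates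
-- each index list afterwards as range(1, c+1), instead of appending to a list per key inside the loop.

-- ===== PORT A =====
-- loop body of A: update counts[key], then pos.setdefault(key, []).append(counts[key])
def pvStepA (st : PySem.Dict String (List Int) × PySem.Dict String Int) (t : String) :
    PySem.Dict String (List Int) × PySem.Dict String Int :=
  let key := PySem.Str.lower t
  let counts := st.2.insert key (st.2.getD key 0 + 1)
  let pos := st.1.modify key [] (fun l => l ++ [counts.getD key 0])
  (pos, counts)

def all_word_positions_py (tokens : List String) : List (String × List Int) :=
  (tokens.foldl pvStepA (PySem.Dict.empty, PySem.Dict.empty)).1.items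

-- ===== PORT B =====
-- loop body of B: counts[k] = counts.get(k, 0) + 1
def pvStepB (d : PySem.Dict String Int) (t : String) : PySem.Dict String Int :=
  let k := PySem.Str.lower t
  d.insert k (d.getD k 0 + 1)

-- value of the final comprehension: list(range(1, c + 1))
def pvRangeVal (p : String × Int) : String × List Int :=
  (p.1, PySem.List.pyRange 1 (p.2 + 1) 1)

def all_word_positions_py_alt (tokens : List String) : List (String × List Int) :=
  (tokens.foldl pvStepB PySem.Dict.empty).items.map pvRangeVal

-- ===== PRECONDITION & SPEC =====
def Spec_all_word_positions_py (tokens : List String) (out : List (String × List Int)) : Prop := out = all_word_positions_py_alt tokens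
instance (tokens : List String) (out : List (String × List Int)) : Decidable (Spec_all_word_positions_py tokens out) := by unfold Spec_all_word_positions_py; infer_instance

-- ===== CLAIM (what is proved, stated in full; the proofs are below) =====
def Claim_equal_all_word_positions_py : Prop := ∀ (tokens : List String), Dom_all_word_positions_py tokens → Spec_all_word_positions_py tokens (all_word_positions_py tokens)

-- ===== LEMMAS AND PROOFS =====

-- get? commutes with mapping the values of the association list
theorem pv_get?_valmap (L : List (String × Int)) (k : String) :
    (PySem.Dict.mk (L.map pvRangeVal)).get? k
      = ((PySem.Dict.mk L).get? k).map (fun n => PySem.List.pyRange 1 (n + 1) 1) := by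
  simp [PySem.Dict.get?, List.find?_map]
  have : ((fun p : String × List Int => p.1 == k) ∘ pvRangeVal)
      = (fun p : String × Int => p.1 == k) := by
    funext p; simp [pvRangeVal]
  rw [this]
  cases h : L.find? (fun p => p.1 == k) <;> simp [pvRangeVal]

-- contains commutes with mapping the values
theorem pv_contains_valmap (L : List (String × Int)) (k : String) :
    (PySem.Dict.mk (L.map pvRangeVal)).contains k = (PySem.Dict.mk L).contains k := by
  simp only [PySem.Dict.contains, List.any_map]
  congr 1

-- insert commutes with mapping the values of the association list
theorem pv_insert_valmap (L : List (String × Int)) (k : String) (v : Int) :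
    (PySem.Dict.mk (L.map pvRangeVal)).insert k (PySem.List.pyRange 1 (v + 1) 1)
      = PySem.Dict.mk ((((PySem.Dict.mk L).insert k v)).items.map pvRangeVal) := by
  simp only [PySem.Dict.insert, pv_contains_valmap]
  split
  · simp only [List.map_map]
    congr 1
    refine List.map_congr_left ?_
    intro p _
    by_cases h : p.1 = k <;> simp [pvRangeVal, h]
  · simp [pvRangeVal]

-- the two loop bodies stay in lock-step: pos is always the value-mapped counts dict
theorem pv_step_eq (counts : PySem.Dict String Int) (t : String)
    (hpos : ∀ p ∈ counts.items, 0 ≤ p.2) :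
    pvStepA (PySem.Dict.mk (counts.items.map pvRangeVal), counts) t
      = (PySem.Dict.mk ((pvStepB counts t).items.map pvRangeVal), pvStepB counts t) := by
  simp only [pvStepA, pvStepB, PySem.Dict.modify, PySem.Dict.getD_insert_self]
  refine Prod.ext ?_ rfl
  show (PySem.Dict.mk (counts.items.map pvRangeVal)).insert (PySem.Str.lower t)
      ((PySem.Dict.mk (counts.items.map pvRangeVal)).getD (PySem.Str.lower t) []
        ++ [counts.getD (PySem.Str.lower t) 0 + 1]) = _
  have hget := pv_get?_valmap counts.items (PySem.Str.lower t)
  have hmk : PySem.Dict.mk counts.items = counts := rfl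
  rw [hmk] at hget
  have hval : (PySem.Dict.mk (counts.items.map pvRangeVal)).getD (PySem.Str.lower t) []
        ++ [counts.getD (PySem.Str.lower t) 0 + 1]
      = PySem.List.pyRange 1 ((counts.getD (PySem.Str.lower t) 0 + 1) + 1) 1 := by
    cases h : counts.get? (PySem.Str.lower t) with
    | none =>
        simp [PySem.Dict.getD, hget, h]
        decide
    | some n =>
        have hn : 0 ≤ n := by
          have hmem : (PySem.Str.lower t, n) ∈ counts.items := by
            simp only [PySem.Dict.get?] at h
            cases hf : counts.items.find? (fun p => p.1 == PySem.Str.lower t) with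
            | none => simp [hf] at h
            | some q =>
                simp [hf] at h
                have hq := List.mem_of_find?_eq_some hf
                have hq1 := List.find?_some hf
                obtain ⟨q1, q2⟩ := q
                simp at hq1 h
                subst h; rwa [hq1] at hq
          exact hpos _ hmem
        simp only [PySem.Dict.getD, hget, h, Option.map_some, Option.getD_some]
        exact (PySem.List.pyRange_one_succ_right (by omega)).symm
  rw [hval]
  exact pv_insert_valmap counts.items (PySem.Str.lower t) (counts.getD (PySem.Str.lower t) 0 + 1)

theorem pv_stepB_pos (counts : PySem.Dict String Int) (t : String)
    (hpos : ∀ p ∈ counts.items, 0 ≤ p.2) :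
    ∀ p ∈ (pvStepB counts t).items, 0 ≤ p.2 := by
  intro p hp
  simp only [pvStepB] at hp
  rcases (PySem.Dict.mem_items_insert _ _ _ _).1 hp with h | ⟨hmem, _⟩
  · subst h
    have : 0 ≤ counts.getD (PySem.Str.lower t) 0 := by
      rw [PySem.Dict.getD_eq_get?_getD]
      cases h : counts.get? (PySem.Str.lower t) with
      | none => simp
      | some n =>
          have hmem := PySem.Dict.mem_items_of_get?_eq_some _ h
          simpa using hpos _ hmem
    simpa using by omega
  · exact hpos _ hmem

-- loop invariant: after any prefix, A's pos dict is B's counts dict with values mapped to ranges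
theorem pv_inv (l : List String) (counts : PySem.Dict String Int)
    (hpos : ∀ p ∈ counts.items, 0 ≤ p.2) :
    (l.foldl pvStepA (PySem.Dict.mk (counts.items.map pvRangeVal), counts)).1
      = PySem.Dict.mk ((l.foldl pvStepB counts).items.map pvRangeVal) := by
  induction l generalizing counts with
  | nil => rfl
  | cons t l ih =>
      simp only [List.foldl_cons]
      rw [pv_step_eq counts t hpos]
      exact ih (pvStepB counts t) (pv_stepB_pos counts t hpos)

-- ===== VERDICT (by name: the statement is the Claim_ definition above) =====
theorem all_word_positions_py_spec : Claim_equal_all_word_positions_py := by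
  intro tokens _
  unfold Spec_all_word_positions_py all_word_positions_py all_word_positions_py_alt
  have h := pv_inv tokens PySem.Dict.empty (by intro p hp; simp [PySem.Dict.empty] at hp)
  have hmk : PySem.Dict.mk ((PySem.Dict.empty : PySem.Dict String Int).items.map pvRangeVal)
      = (PySem.Dict.empty : PySem.Dict String (List Int)) := rfl
  rw [hmk] at h
  rw [h]
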